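-- pv_equiv track=rewrite | github.com/yashvardhancn44/nike-practice | 01otherQuestions/00-easy-to-medium-list/Arrays/findingDuplicatesAndUniqueElements.py | uBrute
-- ===== SOURCE A (Python) =====
-- def uBrute(arr):
--   duplicates = set()
--   for i in range(len(arr)):
--     for j in range(i+1,len(arr)):
--       if arr[i]==arr[j]:
--         duplicates.add(arr[i])
--
--   uniqueElems = [ x for x in arr if x not in duplicates]
--   return duplicates, uniqueElems
-- ===== SOURCE B (Python) =====
-- def uBrute(arr):
--   counts = {}
--   for x in arr:
--     counts[x] = counts.get(x, 0) + 1
--   duplicates = {x for x, c in counts.items() if c > 1}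
--   uniqueElems = [x for x in arr if counts[x] == 1]
--   return duplicates, uniqueElems
-- ===== Notes on version B (the rewrite author's own statement) =====
-- stated objective: faster
-- what changed: Replaced the O(n^2) all-pairs index scan with a single counting pass over a dict (a hand-rolled Counter): duplicates are the keys with count > 1 (in first-occurrence order, matching A's set) and uniques are the elements with count 1.
import Mathlib
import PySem

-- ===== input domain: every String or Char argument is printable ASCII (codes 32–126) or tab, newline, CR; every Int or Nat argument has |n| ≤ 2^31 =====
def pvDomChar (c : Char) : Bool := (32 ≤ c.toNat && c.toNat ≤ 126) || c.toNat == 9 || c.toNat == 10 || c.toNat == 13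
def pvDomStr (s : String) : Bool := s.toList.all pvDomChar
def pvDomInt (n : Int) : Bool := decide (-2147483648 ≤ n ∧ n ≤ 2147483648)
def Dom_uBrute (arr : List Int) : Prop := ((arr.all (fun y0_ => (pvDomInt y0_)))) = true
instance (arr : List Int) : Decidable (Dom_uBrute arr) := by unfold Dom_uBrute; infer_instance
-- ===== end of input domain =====

-- B replaces A's O(n^2) all-pairs scan by one counting pass over a dict; same returned pair.

-- ===== PORT A =====
def uBrute (arr : List Int) : List Int × List Int :=
  let duplicates : PySem.Set Int :=
    (PySem.List.pyRange 0 arr.length 1).foldl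
      (fun d i =>
        (PySem.List.pyRange (i + 1) arr.length 1).foldl
          (fun d j =>
            if PySem.List.pyGetD arr i 0 = PySem.List.pyGetD arr j 0 then
              PySem.Set.add d (PySem.List.pyGetD arr i 0)
            else d) d)
      PySem.Set.empty
  let uniqueElems := arr.filter (fun x => decide (x ∉ duplicates))
  (duplicates, uniqueElems)

-- ===== PORT B =====
def uBrute_alt (arr : List Int) : List Int × List Int :=
  let counts : PySem.Dict Int Int :=
    arr.foldl (fun d x => d.insert x (d.getD x 0 + 1)) PySem.Dict.empty
  let duplicates : PySem.Set Int :=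
    PySem.Set.ofList ((counts.items.filter (fun p => decide (1 < p.2))).map (·.1))
  let uniqueElems := arr.filter (fun x => counts.getD x 0 == 1)
  (duplicates, uniqueElems)

-- ===== PRECONDITION & SPEC =====
def Spec_uBrute (arr : List Int) (out : List Int × List Int) : Prop := out = uBrute_alt arr
instance (arr : List Int) (out : List Int × List Int) : Decidable (Spec_uBrute arr out) := by unfold Spec_uBrute; infer_instance

-- ===== CLAIM (what is proved, stated in full; the proofs are below) =====
def Claim_equal_uBrute : Prop := ∀ (arr : List Int), Dom_uBrute arr → Spec_uBrute arr (uBrute arr)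

-- ===== LEMMAS AND PROOFS =====

-- structural form of A's duplicate-collecting double loop
def gDups (d : PySem.Set Int) : List Int → PySem.Set Int
  | [] => d
  | x :: xs => gDups (if x ∈ xs then PySem.Set.add d x else d) xs

-- the common value both duplicate collections equal
def dupTarget (l : List Int) : List Int :=
  (PySem.Set.ofList l).filter (fun x => decide (1 < (l.count x : Int)))

theorem inner_collapse (x : Int) (l : List Int) (d : PySem.Set Int) :
    l.foldl (fun d y => if x = y then PySem.Set.add d x else d) d
      = if x ∈ l then PySem.Set.add d x else d := by
  induction l generalizing d with
  | nil => simp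
  | cons y ys ih =>
    simp only [List.foldl_cons, ih]
    by_cases hxy : x = y
    · subst hxy; simp
    · simp [hxy]

-- A's indexed outer loop, read from offset t of the full list, is the structural gDups
theorem outer_eq_gDups (full : List Int) (arr : List Int) (t : Nat)
    (h : full.drop t = arr) (d : PySem.Set Int) :
    (PySem.List.pyRange (t : Int) full.length 1).foldl
      (fun d i =>
        if PySem.List.pyGetD full i 0 ∈ full.drop (i + 1).toNat then
          PySem.Set.add d (PySem.List.pyGetD full i 0)
        else d) d = gDups d arr := by
  induction arr generalizing t d with
  | nil =>
    have hle : full.length ≤ t := List.drop_eq_nil_iff.mp h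
    rw [PySem.List.pyRange_one_eq_nil (by exact_mod_cast hle)]
    rfl
  | cons x xs ih =>
    have hlt : t < full.length := by
      have : (full.drop t).length = xs.length + 1 := by rw [h]; simp
      simp at this; omega
    have hget : PySem.List.pyGetD full (t : Int) 0 = x := by
      rw [PySem.List.pyGetD_natCast]
      have : full[t]? = some x := by
        have h0 : (full.drop t)[0]? = full[t + 0]? := List.getElem?_drop
        rw [h] at h0; simpa using h0.symm
      simp [List.getD, this]
    have hdrop1 : full.drop (t + 1) = xs := by
      have : (full.drop t).drop 1 = xs := by rw [h]; simp
      rwa [List.drop_drop] at this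
    rw [PySem.List.pyRange_one_cons (by exact_mod_cast hlt)]
    simp only [List.foldl_cons]
    have htn : ((t : Int) + 1).toNat = t + 1 := by omega
    rw [hget, htn, hdrop1]
    have : ((t : Int) + 1) = ((t + 1 : Nat) : Int) := by push_cast; ring
    rw [this, ih (t + 1) hdrop1]
    rfl

theorem update_filter_ne (l : List Int) (x : Int) (s : PySem.Set Int) (hx : x ∈ s) :
    PySem.Set.update s (l.filter (fun y => !(y == x))) = PySem.Set.update s l := by
  induction l generalizing s with
  | nil => rfl
  | cons y ys ih =>
    by_cases hyx : y = x
    · subst hyx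
      rw [List.filter_cons_of_neg (by simp), PySem.Set.update_cons,
          PySem.Set.add_of_mem hx, ih s hx]
    · rw [List.filter_cons_of_pos (by simp [hyx]), PySem.Set.update_cons,
          PySem.Set.update_cons, ih _ (by simp [PySem.Set.mem_add, hx])]

theorem dupTarget_cons (x : Int) (xs : List Int) :
    dupTarget (x :: xs)
      = if x ∈ xs then x :: (dupTarget xs).filter (fun y => !(y == x))
        else dupTarget xs := by
  unfold dupTarget
  rw [PySem.Set.ofList_cons]
  have hdis : PySem.Set.discard (PySem.Set.ofList xs) x
      = (PySem.Set.ofList xs).filter (fun y => !(y == x)) := rfl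
  by_cases hmem : x ∈ xs
  · rw [if_pos hmem, List.filter_cons_of_pos
      (by simp; have := List.count_pos_iff.mpr hmem; omega)]
    rw [hdis, List.filter_filter, List.filter_filter]
    congr 1
    apply List.filter_congr
    intro y hy
    by_cases hyx : y = x
    · simp [hyx]
    · have hxy' : ¬ (x = y) := fun h => hyx h.symm
      simp [hxy', Bool.and_comm]
  · rw [if_neg hmem, List.filter_cons_of_neg
      (by simp [List.count_eq_zero_of_not_mem hmem])]
    rw [hdis]
    have hfix : (PySem.Set.ofList xs).filter (fun y => !(y == x)) = PySem.Set.ofList xs := by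
      apply List.filter_eq_self.mpr
      intro y hy
      have : y ∈ xs := ((PySem.Set.mem_ofList _ _).mp hy)
      simp
      intro hyx; exact hmem (hyx ▸ this)
    rw [hfix]
    apply List.filter_congr
    intro y hy
    have hyne : y ≠ x := by
      intro hyx; exact hmem (hyx ▸ ((PySem.Set.mem_ofList _ _).mp hy))
    have hxy' : ¬ (x = y) := fun h => hyne h.symm
    simp [hxy']

theorem gDups_eq (l : List Int) (s : PySem.Set Int) :
    gDups s l = PySem.Set.update s (dupTarget l) := by
  induction l generalizing s with
  | nil => rfl
  | cons x xs ih =>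
    rw [dupTarget_cons]
    by_cases hmem : x ∈ xs
    · simp only [gDups, if_pos hmem]
      rw [ih, PySem.Set.update_cons,
          update_filter_ne _ _ _ (by simp [PySem.Set.mem_add])]
    · simp only [gDups, if_neg hmem]
      rw [ih]

theorem dupTarget_nodup (l : List Int) : (dupTarget l).Nodup :=
  (PySem.Set.nodup_ofList l).filter _

theorem dupsA_eq (arr : List Int) :
    (PySem.List.pyRange 0 (arr.length : Int) 1).foldl
      (fun d i =>
        (PySem.List.pyRange (i + 1) (arr.length : Int) 1).foldl
          (fun d j =>
            if PySem.List.pyGetD arr i 0 = PySem.List.pyGetD arr j 0 then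
              PySem.Set.add d (PySem.List.pyGetD arr i 0)
            else d) d)
      PySem.Set.empty = dupTarget arr := by
  have hstep : ∀ (d : PySem.Set Int) (i : Int), i ∈ PySem.List.pyRange 0 (arr.length : Int) 1 →
      (PySem.List.pyRange (i + 1) (arr.length : Int) 1).foldl
        (fun d j =>
          if PySem.List.pyGetD arr i 0 = PySem.List.pyGetD arr j 0 then
            PySem.Set.add d (PySem.List.pyGetD arr i 0)
          else d) d
      = (if PySem.List.pyGetD arr i 0 ∈ arr.drop (i + 1).toNat then
          PySem.Set.add d (PySem.List.pyGetD arr i 0) else d) := by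
    intro d i hi
    have h0 : (0:Int) ≤ i + 1 := by
      have := (PySem.List.mem_pyRange_one.mp hi).1; omega
    rw [PySem.List.foldl_pyRange_pyGetD' arr 0
      (fun d y => if PySem.List.pyGetD arr i 0 = y then
        PySem.Set.add d (PySem.List.pyGetD arr i 0) else d) d h0]
    exact inner_collapse _ _ _
  rw [PySem.List.foldl_congr_mem _ _ _ _ hstep]
  have houter := outer_eq_gDups arr arr 0 (by simp) PySem.Set.empty
  simp only [Nat.cast_zero] at houter
  rw [houter, gDups_eq,
      PySem.Set.update_empty, PySem.Set.ofList_eq_self_of_nodup _ (dupTarget_nodup arr)]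

theorem dupsB_eq (arr : List Int) :
    PySem.Set.ofList
      ((((PySem.Dict.counter arr : PySem.Dict Int Int).items.filter
          (fun p => decide (1 < p.2))).map (·.1))) = dupTarget arr := by
  rw [PySem.Dict.items_counter, List.filter_map, List.map_map]
  have : (PySem.Set.ofList arr).filter
      ((fun p : Int × Int => decide (1 < p.2)) ∘ (fun k => (k, (arr.count k : Int))))
      = dupTarget arr := rfl
  rw [this]
  have hm : List.map ((fun x : Int × Int => x.1) ∘ fun k => (k, (arr.count k : Int)))
      (dupTarget arr) = dupTarget arr := by simp [Function.comp_def]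
  rw [hm]
  exact PySem.Set.ofList_eq_self_of_nodup _ (dupTarget_nodup arr)

theorem uBrute_spec : Claim_equal_uBrute := by
  intro arr _
  unfold Spec_uBrute uBrute uBrute_alt
  rw [PySem.Dict.foldl_insert_getD_add_one_eq_counter]
  simp only [dupsA_eq, dupsB_eq]
  refine congrArg (Prod.mk _) ?_
  apply List.filter_congr
  intro x hx
  have hpos : 0 < arr.count x := List.count_pos_iff.mpr hx
  have hmem : x ∈ dupTarget arr ↔ 1 < (arr.count x : Int) := by
    unfold dupTarget
    simp [List.mem_filter, (PySem.Set.mem_ofList arr x), hx]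
  rw [PySem.Dict.getD_counter]
  by_cases h1 : arr.count x = 1
  · simp [h1, hmem]
  · have : x ∈ dupTarget arr := hmem.mpr (by omega)
    simp [this]
    omega
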